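-- pv_equiv track=rewrite | github.com/cooelf/SG-Net | convert_span.py | convert_head_to_span
-- ===== SOURCE A (Python) =====
-- def convert_head_to_span(all_heads):
--     hpsg_lists = []
--     for heads in all_heads:
--         n = len(heads)
--         childs = [[] for i in range(n+1)]
--         left_p = [i for i in range(n+1)]
--         right_p = [i for i in range(n+1)]
--
--         def dfs(x):
--             for child in childs[x]:
--                 dfs(child)
--                 left_p[x] = min(left_p[x], left_p[child])
--                 right_p[x] = max(right_p[x], right_p[child])
--
--         for i, head in enumerate(heads):
--             childs[head].append(i+1)
--
--         dfs(0)
--         hpsg_list = []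
--         for i in range(1,n+1):
--             hpsg_list.append((left_p[i], right_p[i]))
--
--         hpsg_lists.append(hpsg_list)
--
--     return hpsg_lists
-- ===== SOURCE B (Python) =====
-- def convert_head_to_span(all_heads):
--     hpsg_lists = []
--     for heads in all_heads:
--         n = len(heads)
--         childs = [[] for _ in range(n + 1)]
--         left_p = list(range(n + 1))
--         right_p = list(range(n + 1))
--         for i, head in enumerate(heads):
--             childs[head].append(i + 1)
--         # iterative DFS instead of recursion: a task stack with two task kinds,
--         # ("visit", x) expands a node, ("fold", x, c) merges a finished child's
--         # span into its parent, reproducing the recursive post-order exactly.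
--         stack = [("visit", 0)]
--         while stack:
--             task = stack.pop()
--             if task[0] == "visit":
--                 x = task[1]
--                 for c in reversed(childs[x]):
--                     stack.append(("fold", x, c))
--                     stack.append(("visit", c))
--             else:
--                 _, x, c = task
--                 left_p[x] = min(left_p[x], left_p[c])
--                 right_p[x] = max(right_p[x], right_p[c])
--         hpsg_lists.append([(left_p[i], right_p[i]) for i in range(1, n + 1)])
--     return hpsg_lists
-- ===== Notes on version B (the rewrite author's own statement) =====
-- stated objective: alternative
-- what changed: The recursive dfs over the childs tree is replaced by an explicit iterative task-stack machine (visit/fold tasks) that performs the same post-order fold without Python recursion.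
import Mathlib
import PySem

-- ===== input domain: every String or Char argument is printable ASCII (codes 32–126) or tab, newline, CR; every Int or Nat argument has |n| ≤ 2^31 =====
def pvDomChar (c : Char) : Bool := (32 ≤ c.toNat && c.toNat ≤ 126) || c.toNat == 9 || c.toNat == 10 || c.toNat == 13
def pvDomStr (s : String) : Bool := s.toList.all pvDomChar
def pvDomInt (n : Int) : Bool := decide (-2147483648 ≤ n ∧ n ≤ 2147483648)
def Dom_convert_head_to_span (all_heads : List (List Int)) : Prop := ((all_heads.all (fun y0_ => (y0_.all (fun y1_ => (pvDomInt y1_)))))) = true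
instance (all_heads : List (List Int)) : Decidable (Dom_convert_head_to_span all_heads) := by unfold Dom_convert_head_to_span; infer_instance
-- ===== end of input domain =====

-- B replaces A's recursive dfs by an explicit iterative task-stack traversal doing the
-- same post-order fold; equivalence of the two traversals is proved for every input.

-- ===== PORT A =====
-- shared preprocessing (identical lines in both Pythons): childs[head].append(i+1);
-- 'head' is a Python list index, normalized with mod (n+1) (exact for -(n+1) ≤ head ≤ n, i.e. on Pre_)
def buildChilds (heads : List Int) (n : Nat) : List (List Nat) :=
  heads.zipIdx.foldl
    (fun ch hi =>
      let k := (PySem.Int.mod hi.1 (Int.ofNat (n + 1))).toNat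
      ch.set k (ch.getD k [] ++ [hi.2 + 1]))
    (List.replicate (n + 1) [])

-- the two update lines left_p[x] = min(left_p[x], left_p[c]); right_p[x] = max(...), shared verbatim by A and B
def pvStep (x c : Nat) (st : List Int × List Int) : List Int × List Int :=
  (st.1.set x (min (st.1.getD x 0) (st.1.getD c 0)),
   st.2.set x (max (st.2.getD x 0) (st.2.getD c 0)))

-- A's recursive dfs; the fuel argument (started at n+1, never exhausted on real inputs:
-- a node repeats on a dfs path only through a cycle, and cycles are unreachable from 0)
-- is only a totality guard
def dfsA (childs : List (List Nat)) : Nat → Nat → List Int × List Int → List Int × List Int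
  | 0, _, st => st
  | f + 1, x, st => (childs.getD x []).foldl (fun st c => pvStep x c (dfsA childs f c st)) st

def convert_head_to_span (all_heads : List (List Int)) : List (List (Int × Int)) :=
  all_heads.map (fun heads =>
    let n := heads.length
    let childs := buildChilds heads n
    let lp := (List.range (n + 1)).map Int.ofNat
    let st := dfsA childs (n + 1) 0 (lp, lp)
    (List.range' 1 n).map (fun i => (st.1.getD i 0, st.2.getD i 0)))

-- ===== PORT B =====
-- B's task stack: ("visit", x) (carrying, in the port only, the same totality-guard fuel
-- as dfsA) and ("fold", x, c)
inductive PVTask where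
  | visit : Nat → Nat → PVTask
  | fold : Nat → Nat → PVTask
deriving DecidableEq, Repr

def pvWeight (L : Nat) : PVTask → Nat
  | .visit _ f => (L + 2) ^ (f + 1)
  | .fold _ _ => 1

theorem pv_len_getD_le {α : Type} (ls : List (List α)) (x : Nat) :
    (ls.getD x []).length ≤ (ls.map List.length).sum := by
  by_cases h : x < ls.length
  · have hm : ls[x].length ∈ ls.map List.length :=
      List.mem_map_of_mem (List.getElem_mem h)
    have := List.le_sum_of_mem hm
    simpa [List.getD, List.getElem?_eq_getElem h] using this
  · simp [List.getD, List.getElem?_eq_none (Nat.le_of_not_lt h)]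

-- B's while-stack loop; the per-visit fuel is the totality guard (Python's loop has none)
def runB (childs : List (List Nat)) : List PVTask → List Int × List Int → List Int × List Int
  | [], st => st
  | .fold x c :: rest, st => runB childs rest (pvStep x c st)
  | .visit _ 0 :: rest, st => runB childs rest st
  | .visit x (f + 1) :: rest, st =>
      runB childs ((childs.getD x []).flatMap (fun c => [.visit c f, .fold x c]) ++ rest) st
termination_by tasks _ => (tasks.map (pvWeight ((childs.map List.length).sum))).sum
decreasing_by
  · simp [pvWeight]
  · simp [pvWeight]
  · simp only [List.map_append, List.sum_append, List.map_cons, List.sum_cons]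
    have hL := pv_len_getD_le childs x
    set L := (childs.map List.length).sum
    set k := (childs.getD x []).length with hk
    have hflat : (((childs.getD x []).flatMap fun c => [PVTask.visit c f, PVTask.fold x c]).map
        (pvWeight L)).sum = k * ((L + 2) ^ (f + 1) + 1) := by
      rw [hk]
      induction childs.getD x [] with
      | nil => simp
      | cons c cs ih => simp [pvWeight, ih]; ring
    rw [hflat]
    have hX : L + 2 ≤ (L + 2) ^ (f + 1) := by
      calc L + 2 = (L + 2) ^ 1 := by ring
        _ ≤ (L + 2) ^ (f + 1) := Nat.pow_le_pow_right (by omega) (by omega)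
    have : k * ((L + 2) ^ (f + 1) + 1) < (L + 2) ^ (f + 1 + 1) := by
      calc k * ((L + 2) ^ (f + 1) + 1) ≤ L * ((L + 2) ^ (f + 1) + 1) :=
            Nat.mul_le_mul_right _ hL
        _ = L * (L + 2) ^ (f + 1) + L := by ring
        _ < L * (L + 2) ^ (f + 1) + 2 * (L + 2) ^ (f + 1) := by omega
        _ = (L + 2) ^ (f + 1 + 1) := by ring
    simp [pvWeight]; omega

def convert_head_to_span_alt (all_heads : List (List Int)) : List (List (Int × Int)) :=
  all_heads.map (fun heads =>
    let n := heads.length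
    let childs := buildChilds heads n
    let lp := (List.range (n + 1)).map Int.ofNat
    let st := runB childs [PVTask.visit 0 (n + 1)] (lp, lp)
    (List.range' 1 n).map (fun i => (st.1.getD i 0, st.2.getD i 0)))

-- ===== PRECONDITION & SPEC =====
-- Pre_ excludes exactly the inputs on which Python A raises IndexError: some head outside
-- the Python list-index range [-(n+1), n] of the childs list
def Pre_convert_head_to_span (all_heads : List (List Int)) : Prop :=
  ∀ heads ∈ all_heads, ∀ h ∈ heads, -((heads.length : Int) + 1) ≤ h ∧ h ≤ (heads.length : Int)
instance (all_heads : List (List Int)) : Decidable (Pre_convert_head_to_span all_heads) := by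
  unfold Pre_convert_head_to_span; infer_instance

def pvWitness_convert_head_to_span : List (List Int) := [[0, 1, 0], [2, 0]]

def Spec_convert_head_to_span (all_heads : List (List Int)) (out : List (List (Int × Int))) : Prop := out = convert_head_to_span_alt all_heads
instance (all_heads : List (List Int)) (out : List (List (Int × Int))) : Decidable (Spec_convert_head_to_span all_heads out) := by unfold Spec_convert_head_to_span; infer_instance

-- ===== CLAIM (what is proved, stated in full; the proofs are below) =====
def Claim_equal_convert_head_to_span : Prop := ∀ (all_heads : List (List Int)), Dom_convert_head_to_span all_heads → Pre_convert_head_to_span all_heads → Spec_convert_head_to_span all_heads (convert_head_to_span all_heads)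

-- ===== LEMMAS AND PROOFS =====

theorem runB_nil (childs : List (List Nat)) (st : List Int × List Int) :
    runB childs [] st = st := by rw [runB.eq_1]

theorem runB_fold (childs : List (List Nat)) (x c : Nat) (rest : List PVTask) (st) :
    runB childs (.fold x c :: rest) st = runB childs rest (pvStep x c st) := by rw [runB.eq_2]

theorem runB_visit_zero (childs : List (List Nat)) (x : Nat) (rest : List PVTask) (st) :
    runB childs (.visit x 0 :: rest) st = runB childs rest st := by rw [runB.eq_3]

theorem runB_visit_succ (childs : List (List Nat)) (x f : Nat) (rest : List PVTask) (st) :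
    runB childs (.visit x (f + 1) :: rest) st =
      runB childs ((childs.getD x []).flatMap (fun c => [.visit c f, .fold x c]) ++ rest) st := by
  rw [runB.eq_4]

-- the simulation: popping a visit task runs exactly one dfsA call
theorem runB_visit (childs : List (List Nat)) (f : Nat) :
    ∀ (x : Nat) (rest : List PVTask) (st : List Int × List Int),
      runB childs (.visit x f :: rest) st = runB childs rest (dfsA childs f x st) := by
  induction f with
  | zero => intro x rest st; rw [runB_visit_zero, dfsA]
  | succ f ih =>
      intro x rest st
      rw [runB_visit_succ, dfsA]
      induction childs.getD x [] generalizing st with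
      | nil => simp
      | cons c cs ihc =>
          rw [List.flatMap_cons]
          simp only [List.cons_append, List.append_assoc, List.foldl_cons]
          rw [ih c _ st, runB_fold]
          exact ihc _

theorem runB_top (childs : List (List Nat)) (f x : Nat) (st : List Int × List Int) :
    runB childs [PVTask.visit x f] st = dfsA childs f x st := by
  rw [runB_visit, runB_nil]

-- ===== VERDICT (by name: the statement is the Claim_ definition above) =====
theorem convert_head_to_span_spec : Claim_equal_convert_head_to_span := by
  intro all_heads _dom _pre
  unfold Spec_convert_head_to_span convert_head_to_span convert_head_to_span_alt
  exact List.map_congr_left (fun heads _ => by simp only [runB_top])
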